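-- pv_equiv track=rewrite | github.com/huwl404/NiLab | jalign/divide_histogram.py | find_loops_in_star
-- ===== SOURCE A (Python) =====
-- def find_loops_in_star(lines):
--     """
--     找出 STAR 文件中所有 loop_ 的位置与 header。
--     返回 list of dict:
--       {
--         'loop_start': idx_of_loop_line,
--         'header_start': idx_first_header_line (first line starting with '_'),
--         'header_end': idx_last_header_line (exclusive, i.e. header lines are [header_start:header_end)),
--         'data_start': idx_first_data_line,
--         'data_end': idx_line_after_last_data (exclusive)
--       }
--     """
--     n = len(lines)
--     i = 0
--     loops = []
--     while i < n:
--         line = lines[i].strip()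
--         if line.lower().startswith('loop_'):
--             loop_start = i
--             # gather headers
--             j = i + 1
--             header_start = None
--             while j < n and lines[j].strip().startswith('_'):
--                 if header_start is None:
--                     header_start = j
--                 j += 1
--             header_end = j  # exclusive
--
--             data_start = j
--             k = j
--             while k < n:
--                 s = lines[k].strip()
--                 if s.startswith('_') or s.lower().startswith('loop_') or s.lower().startswith('data_'):
--                     break
--                 k += 1
--             data_end = k  # exclusive
--             loops.append({
--                 'loop_start': loop_start,
--                 'header_start': header_start,
--                 'header_end': header_end,
--                 'data_start': data_start,
--                 'data_end': data_end,
--             })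
--             i = data_end
--         else:
--             i += 1
--     return loops
-- ===== SOURCE B (Python) =====
-- def find_loops_in_star(lines):
--     """Single forward pass with an explicit state machine instead of nested index loops."""
--     loops = []
--     mode = 0  # 0 = outside, 1 = collecting headers, 2 = collecting data
--     loop_start = header_start = header_end = data_start = None
--     for i, raw in enumerate(lines):
--         s = raw.strip()
--         low = s.lower()
--         is_us = s.startswith('_')
--         is_loop = low.startswith('loop_')
--         is_data = low.startswith('data_')
--         if mode == 1:
--             if is_us:
--                 if header_start is None:
--                     header_start = i
--                 continue
--             header_end = i
--             data_start = i
--             mode = 2  # fall through: reconsider this line as data/terminator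
--         if mode == 2:
--             if is_us or is_loop or is_data:
--                 loops.append({
--                     'loop_start': loop_start,
--                     'header_start': header_start,
--                     'header_end': header_end,
--                     'data_start': data_start,
--                     'data_end': i,
--                 })
--                 mode = 0  # fall through: reconsider this line as a loop_ opener
--             else:
--                 continue
--         if is_loop:
--             mode = 1
--             loop_start = i
--             header_start = None
--     n = len(lines)
--     if mode == 1:
--         loops.append({'loop_start': loop_start, 'header_start': header_start,
--                       'header_end': n, 'data_start': n, 'data_end': n})
--     elif mode == 2:
--         loops.append({'loop_start': loop_start, 'header_start': header_start,
--                       'header_end': header_end, 'data_start': data_start, 'data_end': n})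
--     return loops
-- ===== Notes on version B (the rewrite author's own statement) =====
-- stated objective: alternative
-- what changed: Replaced the index-jumping outer while-loop with two nested inner scans by a single forward pass over enumerate(lines) driven by an explicit outside/header/data state machine that falls through to reconsider terminator lines and flushes the open block at EOF.
import Mathlib
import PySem

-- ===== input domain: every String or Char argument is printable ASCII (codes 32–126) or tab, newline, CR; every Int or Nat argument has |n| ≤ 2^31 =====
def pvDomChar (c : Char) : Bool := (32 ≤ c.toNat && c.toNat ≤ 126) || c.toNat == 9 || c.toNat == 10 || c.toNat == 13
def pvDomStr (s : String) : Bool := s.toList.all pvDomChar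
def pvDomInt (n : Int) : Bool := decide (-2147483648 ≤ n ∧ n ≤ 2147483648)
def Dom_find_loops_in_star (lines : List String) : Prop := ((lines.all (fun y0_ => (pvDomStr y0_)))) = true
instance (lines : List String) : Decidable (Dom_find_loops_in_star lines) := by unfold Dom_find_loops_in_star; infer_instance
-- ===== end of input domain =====

-- B replaces A's index-jumping outer loop with nested inner scans by a single
-- forward pass with an explicit outside/header/data state machine (objective: alternative).

-- ===== PORT A =====
-- inner header-gathering while loop of A
def aHeaderScan (lines : List String) (n j : Nat) (hs : Option Nat) : Option Nat × Nat :=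
  if h : j < n ∧ PySem.Str.startswith (PySem.Str.strip (lines.getD j "")) "_" = true then
    aHeaderScan lines n (j + 1) (if hs = none then some j else hs)
  else (hs, j)
termination_by n - j
decreasing_by have := h.1; omega

-- inner data-gathering while loop of A
def aDataScan (lines : List String) (n k : Nat) : Nat :=
  if h : k < n then
    if (PySem.Str.startswith (PySem.Str.strip (lines.getD k "")) "_"
        || PySem.Str.startswith (PySem.Str.lower (PySem.Str.strip (lines.getD k ""))) "loop_"
        || PySem.Str.startswith (PySem.Str.lower (PySem.Str.strip (lines.getD k ""))) "data_") = true
    then k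
    else aDataScan lines n (k + 1)
  else k
termination_by n - k

-- scans only move forward (cited by aOuter's decreasing_by)
theorem aHeaderScan_ge (lines : List String) (n : Nat) :
    ∀ d j hs, n - j = d → j ≤ (aHeaderScan lines n j hs).2 := by
  intro d
  induction d with
  | zero =>
    intro j hs hd
    rw [aHeaderScan]
    split
    · omega
    · simp
  | succ d ih =>
    intro j hs hd
    rw [aHeaderScan]
    split
    · rename_i h
      have := ih (j + 1) (if hs = none then some j else hs) (by omega)
      omega
    · simp

theorem aDataScan_ge (lines : List String) (n : Nat) :
    ∀ d k, n - k = d → k ≤ aDataScan lines n k := by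
  intro d
  induction d with
  | zero =>
    intro k hd
    rw [aDataScan]
    split
    · rename_i h; omega
    · omega
  | succ d ih =>
    intro k hd
    rw [aDataScan]
    split
    · split
      · omega
      · have := ih (k + 1) (by omega); omega
    · omega

-- outer while loop of A
def aOuter (lines : List String) (n i : Nat) (loops : List (List (String × Option Int))) :
    List (List (String × Option Int)) :=
  if h : i < n then
    if PySem.Str.startswith (PySem.Str.lower (PySem.Str.strip (lines.getD i ""))) "loop_" = true then
      aOuter lines n (aDataScan lines n (aHeaderScan lines n (i + 1) none).2) (loops ++
        [[("loop_start", some (i : Int)),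
          ("header_start", (aHeaderScan lines n (i + 1) none).1.map (fun x => (x : Int))),
          ("header_end", some ((aHeaderScan lines n (i + 1) none).2 : Int)),
          ("data_start", some ((aHeaderScan lines n (i + 1) none).2 : Int)),
          ("data_end", some ((aDataScan lines n (aHeaderScan lines n (i + 1) none).2) : Int))]])
    else aOuter lines n (i + 1) loops
  else loops
termination_by n - i
decreasing_by
  · have h1 := aHeaderScan_ge lines n (n - (i + 1)) (i + 1) none rfl
    have h2 := aDataScan_ge lines n (n - (aHeaderScan lines n (i + 1) none).2)
      (aHeaderScan lines n (i + 1) none).2 rfl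
    omega
  · omega

def find_loops_in_star (lines : List String) : List (List (String × Option Int)) :=
  aOuter lines lines.length 0 []

-- ===== PORT B =====
inductive PvMode where
  | outside : PvMode
  | header : Nat → Option Nat → PvMode
  | data : Nat → Option Nat → Nat → Nat → PvMode
deriving DecidableEq

def bBlock (ls : Nat) (hs : Option Nat) (he ds de : Nat) : List (String × Option Int) :=
  [("loop_start", some (ls : Int)),
   ("header_start", hs.map (fun x => (x : Int))),
   ("header_end", some (he : Int)),
   ("data_start", some (ds : Int)),
   ("data_end", some (de : Int))]

-- the final `if is_loop` of the loop body (mode 0)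
def bStepOut (i : Nat) (is_loop : Bool) (loops : List (List (String × Option Int))) :
    List (List (String × Option Int)) × PvMode :=
  if is_loop then (loops, .header i none) else (loops, .outside)

-- the `if mode == 2` part of the loop body, falling through to mode 0
def bStepData (i : Nat) (is_us is_loop is_data : Bool) (ls : Nat) (hs : Option Nat)
    (he ds : Nat) (loops : List (List (String × Option Int))) :
    List (List (String × Option Int)) × PvMode :=
  if (is_us || is_loop || is_data) = true then
    bStepOut i is_loop (loops ++ [bBlock ls hs he ds i])
  else (loops, .data ls hs he ds)

-- one iteration of B's for loop (s, low and the three flags of Source B are inlined)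
def bStep (i : Nat) (raw : String) (st : PvMode)
    (loops : List (List (String × Option Int))) :
    List (List (String × Option Int)) × PvMode :=
  match st with
  | .outside =>
      bStepOut i (PySem.Str.startswith (PySem.Str.lower (PySem.Str.strip raw)) "loop_") loops
  | .header ls hs =>
      if PySem.Str.startswith (PySem.Str.strip raw) "_" = true then
        (loops, .header ls (if hs = none then some i else hs))
      else
        bStepData i (PySem.Str.startswith (PySem.Str.strip raw) "_")
          (PySem.Str.startswith (PySem.Str.lower (PySem.Str.strip raw)) "loop_")
          (PySem.Str.startswith (PySem.Str.lower (PySem.Str.strip raw)) "data_") ls hs i i loops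
  | .data ls hs he ds =>
      bStepData i (PySem.Str.startswith (PySem.Str.strip raw) "_")
        (PySem.Str.startswith (PySem.Str.lower (PySem.Str.strip raw)) "loop_")
        (PySem.Str.startswith (PySem.Str.lower (PySem.Str.strip raw)) "data_") ls hs he ds loops

-- flush of the open block after the loop (the index has reached n there)
def bFlush (n : Nat) (st : PvMode) : List (List (String × Option Int)) :=
  match st with
  | .outside => []
  | .header ls hs => [bBlock ls hs n n n]
  | .data ls hs he ds => [bBlock ls hs he ds n]

-- B's for loop over enumerate(lines), followed by the EOF flush
def bRun (i : Nat) (rest : List String) (st : PvMode)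
    (loops : List (List (String × Option Int))) : List (List (String × Option Int)) :=
  match rest with
  | [] => loops ++ bFlush i st
  | raw :: rest' => bRun (i + 1) rest' (bStep i raw st loops).2 (bStep i raw st loops).1

def find_loops_in_star_alt (lines : List String) : List (List (String × Option Int)) :=
  bRun 0 lines .outside []

-- ===== PRECONDITION & SPEC =====
def Spec_find_loops_in_star (lines : List String) (out : List (List (String × Option Int))) : Prop := out = find_loops_in_star_alt lines
instance (lines : List String) (out : List (List (String × Option Int))) : Decidable (Spec_find_loops_in_star lines out) := by unfold Spec_find_loops_in_star; infer_instance

-- ===== CLAIM (what is proved, stated in full; the proofs are below) =====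
def Claim_equal_find_loops_in_star : Prop := ∀ (lines : List String), Dom_find_loops_in_star lines → Spec_find_loops_in_star lines (find_loops_in_star lines)

-- ===== LEMMAS AND PROOFS =====

theorem drop_cons_of_lt (lines : List String) (i : Nat) (h : i < lines.length) :
    lines.drop i = lines.getD i "" :: lines.drop (i + 1) := by
  rw [List.drop_eq_getElem_cons h, List.getD_eq_getElem lines "" h]

theorem aHeaderScan_le (lines : List String) (n : Nat) :
    ∀ d j hs, n - j = d → j ≤ n → (aHeaderScan lines n j hs).2 ≤ n := by
  intro d
  induction d with
  | zero =>
    intro j hs hd hj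
    rw [aHeaderScan]
    split
    · rename_i h; omega
    · simpa using hj
  | succ d ih =>
    intro j hs hd hj
    rw [aHeaderScan]
    split
    · rename_i h; exact ih (j + 1) _ (by omega) (by omega)
    · simpa using hj

theorem aDataScan_le (lines : List String) (n : Nat) :
    ∀ d k, n - k = d → k ≤ n → aDataScan lines n k ≤ n := by
  intro d
  induction d with
  | zero =>
    intro k hd hk
    rw [aDataScan]
    split
    · rename_i h; omega
    · exact hk
  | succ d ih =>
    intro k hd hk
    rw [aDataScan]
    split
    · rename_i h
      split
      · omega
      · exact ih (k + 1) (by omega) (by omega)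
    · exact hk

-- B's pass from a data state equals A's data scan, then continues outside at data_end
theorem bRun_data (lines : List String) :
    ∀ d k, lines.length - k = d → k ≤ lines.length → ∀ ls hs he ds loops,
      bRun k (lines.drop k) (.data ls hs he ds) loops
        = bRun (aDataScan lines lines.length k)
            (lines.drop (aDataScan lines lines.length k)) .outside
            (loops ++ [bBlock ls hs he ds (aDataScan lines lines.length k)]) := by
  intro d
  induction d with
  | zero =>
    intro k hd hk ls hs he ds loops
    have hk' : k = lines.length := by omega
    subst hk'
    have hA : aDataScan lines lines.length lines.length = lines.length := by
      rw [aDataScan]; rw [dif_neg (by omega)]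
    rw [hA]
    simp [bRun, bFlush]
  | succ d ih =>
    intro k hd hk ls hs he ds loops
    have hlt : k < lines.length := by
      omega
    by_cases hterm : (PySem.Str.startswith (PySem.Str.strip (lines.getD k "")) "_"
        || PySem.Str.startswith (PySem.Str.lower (PySem.Str.strip (lines.getD k ""))) "loop_"
        || PySem.Str.startswith (PySem.Str.lower (PySem.Str.strip (lines.getD k ""))) "data_") = true
    · -- terminator: both sides take one identical step from index k
      have hA : aDataScan lines lines.length k = k := by
        rw [aDataScan]; rw [dif_pos hlt, if_pos hterm]
      rw [hA]
      rw [drop_cons_of_lt lines k hlt]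
      simp only [bRun, bStep, bStepData]
      rw [if_pos hterm]
    · have hA : aDataScan lines lines.length k = aDataScan lines lines.length (k + 1) := by
        rw [aDataScan]; rw [dif_pos hlt, if_neg hterm]
      rw [hA]
      rw [drop_cons_of_lt lines k hlt]
      simp only [bRun, bStep, bStepData]
      rw [if_neg hterm]
      exact ih (k + 1) (by omega) (by omega) ls hs he ds loops

-- B's pass from a header state equals A's header scan, then continues in data state
theorem bRun_header (lines : List String) :
    ∀ d j, lines.length - j = d → j ≤ lines.length → ∀ ls hs loops,
      bRun j (lines.drop j) (.header ls hs) loops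
        = bRun (aHeaderScan lines lines.length j hs).2
            (lines.drop (aHeaderScan lines lines.length j hs).2)
            (.data ls (aHeaderScan lines lines.length j hs).1
              (aHeaderScan lines lines.length j hs).2
              (aHeaderScan lines lines.length j hs).2) loops := by
  intro d
  induction d with
  | zero =>
    intro j hd hj ls hs loops
    have hj' : j = lines.length := by omega
    subst hj'
    have hA : aHeaderScan lines lines.length lines.length hs = (hs, lines.length) := by
      rw [aHeaderScan]; rw [dif_neg (by omega)]
    rw [hA]
    simp [bRun, bFlush]
  | succ d ih =>
    intro j hd hj ls hs loops
    have hlt : j < lines.length := by omega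
    by_cases hus : PySem.Str.startswith (PySem.Str.strip (lines.getD j "")) "_" = true
    · have hA : aHeaderScan lines lines.length j hs
          = aHeaderScan lines lines.length (j + 1) (if hs = none then some j else hs) := by
        rw [aHeaderScan]; rw [dif_pos ⟨hlt, hus⟩]
      rw [hA]
      rw [drop_cons_of_lt lines j hlt]
      simp only [bRun, bStep]
      rw [if_pos hus]
      exact ih (j + 1) (by omega) (by omega) ls _ loops
    · have hA : aHeaderScan lines lines.length j hs = (hs, j) := by
        rw [aHeaderScan]; rw [dif_neg (fun hh => hus hh.2)]
      rw [hA]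
      rw [drop_cons_of_lt lines j hlt]
      simp only [bRun, bStep]
      rw [if_neg hus]

-- the main invariant: A's outer loop from i equals B's pass over the suffix from i
theorem outer_eq (lines : List String) :
    ∀ d i loops, lines.length - i = d → i ≤ lines.length →
      aOuter lines lines.length i loops = bRun i (lines.drop i) .outside loops := by
  intro d
  induction d using Nat.strong_induction_on with
  | _ d ih =>
  intro i loops hd hi
  by_cases hlt : i < lines.length
  · rw [drop_cons_of_lt lines i hlt]
    rw [aOuter]; rw [dif_pos hlt]
    by_cases hl : PySem.Str.startswith
        (PySem.Str.lower (PySem.Str.strip (lines.getD i ""))) "loop_" = true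
    · rw [if_pos hl]
      simp only [bRun, bStep, bStepOut]
      rw [if_pos hl]
      have hj_ge := aHeaderScan_ge lines lines.length (lines.length - (i + 1)) (i + 1) none rfl
      have hj_le := aHeaderScan_le lines lines.length (lines.length - (i + 1)) (i + 1) none rfl
        (by omega)
      rw [bRun_header lines (lines.length - (i + 1)) (i + 1) rfl (by omega)]
      set j := (aHeaderScan lines lines.length (i + 1) none).2 with hj
      have hk_ge := aDataScan_ge lines lines.length (lines.length - j) j rfl
      have hk_le := aDataScan_le lines lines.length (lines.length - j) j rfl hj_le
      rw [bRun_data lines (lines.length - j) j rfl hj_le]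
      rw [ih (lines.length - aDataScan lines lines.length j) (by omega) _ _ rfl (by omega)]
      rfl
    · rw [if_neg hl]
      simp only [bRun, bStep, bStepOut]
      rw [if_neg hl]
      exact ih (lines.length - (i + 1)) (by omega) (i + 1) loops rfl (by omega)
  · have hi' : i = lines.length := by omega
    subst hi'
    rw [aOuter]; rw [dif_neg (by omega)]
    simp [bRun, bFlush]

-- ===== VERDICT (by name: the statement is the Claim_ definition above) =====
theorem find_loops_in_star_spec : Claim_equal_find_loops_in_star := by
  intro lines _
  unfold Spec_find_loops_in_star find_loops_in_star find_loops_in_star_alt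
  simpa using outer_eq lines lines.length 0 [] (by omega) (by omega)
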